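-- pv_equiv track=rewrite | github.com/ngquynh123/SFTT | retriever/main.py | _build_context_block_from_hits
-- ===== SOURCE A (Python) =====
-- from typing import List, Dict, Any, Optional, Tuple
--
-- def _build_context_block_from_hits(ctx_hits: List[str], topn_ctx: int, max_chars_per_item: int, max_total_chars: int) -> str:
--     blocks, total = [], 0
--     for idx, text in enumerate(ctx_hits[:topn_ctx], 1):
--         head = f"[{idx}]"
--         body = (text or "").replace("\r"," ").replace("\t"," ").strip()
--         if len(body) > max_chars_per_item: body = body[:max_chars_per_item] + "…"
--         block = head + "\n" + body
--         if total + len(block) > max_total_chars: break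
--         blocks.append(block); total += len(block)
--     return "\n\n".join(blocks)
-- ===== SOURCE B (Python) =====
-- def _build_context_block_from_hits(ctx_hits, topn_ctx, max_chars_per_item, max_total_chars):
--     def fmt(idx, text):
--         body = (text or "").replace("\r", " ").replace("\t", " ").strip()
--         if len(body) > max_chars_per_item:
--             body = body[:max_chars_per_item] + "…"
--         return f"[{idx}]\n{body}"
--     blocks = [fmt(i, t) for i, t in enumerate(ctx_hits[:topn_ctx], 1)]
--     totals = []
--     run = 0
--     for b in blocks:
--         run += len(b)
--         totals.append(run)
--     keep = next((k for k, t in enumerate(totals) if t > max_total_chars), len(blocks))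
--     return "\n\n".join(blocks[:keep])
-- ===== Notes on version B (the rewrite author's own statement) =====
-- stated objective: alternative
-- what changed: Replaces A's single interleaved loop (format + running-total + break) by a pipeline: map-format all candidate blocks, compute running totals in a separate pass, find the first index whose total exceeds the limit, and join that prefix.
import Mathlib
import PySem

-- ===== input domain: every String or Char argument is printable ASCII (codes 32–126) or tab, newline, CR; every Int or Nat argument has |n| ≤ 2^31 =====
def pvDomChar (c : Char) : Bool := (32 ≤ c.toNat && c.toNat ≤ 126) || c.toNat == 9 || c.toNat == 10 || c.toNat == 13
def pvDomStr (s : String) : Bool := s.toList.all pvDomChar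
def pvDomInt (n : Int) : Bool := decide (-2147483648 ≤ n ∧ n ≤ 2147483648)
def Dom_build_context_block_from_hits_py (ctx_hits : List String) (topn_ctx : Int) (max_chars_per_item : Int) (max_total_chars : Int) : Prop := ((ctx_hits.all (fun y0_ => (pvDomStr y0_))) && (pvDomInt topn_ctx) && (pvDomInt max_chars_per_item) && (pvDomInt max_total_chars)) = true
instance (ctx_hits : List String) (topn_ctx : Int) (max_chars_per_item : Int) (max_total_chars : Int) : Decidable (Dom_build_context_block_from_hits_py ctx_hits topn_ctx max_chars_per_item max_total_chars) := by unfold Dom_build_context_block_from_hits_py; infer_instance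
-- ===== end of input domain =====

-- B replaces A's single interleaved loop (format + running total + break) by a pipeline:
-- format all blocks, accumulate lengths in a second pass, find the first overflowing index,
-- join that prefix ("alternative" decomposition, same asymptotic cost).

-- ===== PORT A =====
-- the for-loop of A: state = (blocks, total); 'break' = return blocks
def pvGoA (max_chars_per_item max_total_chars : Int) :
    List (Int × String) → List String → Int → List String
  | [], blocks, _ => blocks
  | (idx, text) :: rest, blocks, total =>
    let head := "[" ++ PySem.Int.toStr idx ++ "]"
    let body0 := if text == "" then "" else text
    let body1 := PySem.Str.strip (PySem.Str.replace (PySem.Str.replace body0 "\r" " ") "\t" " ")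
    let body := if PySem.Str.len body1 > max_chars_per_item
                then PySem.Str.slice body1 none (some max_chars_per_item) ++ "…"
                else body1
    let block := head ++ "\n" ++ body
    if total + PySem.Str.len block > max_total_chars then blocks
    else pvGoA max_chars_per_item max_total_chars rest (blocks ++ [block]) (total + PySem.Str.len block)

def build_context_block_from_hits_py (ctx_hits : List String) (topn_ctx : Int) (max_chars_per_item : Int) (max_total_chars : Int) : String :=
  PySem.Str.join "\n\n"
    (pvGoA max_chars_per_item max_total_chars
      (PySem.List.enumerate (PySem.List.slice ctx_hits none (some topn_ctx)) 1) [] 0)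

-- ===== PORT B =====
-- fmt(idx, text) of Source B
def pvFmtB (max_chars_per_item : Int) (idx : Int) (text : String) : String :=
  let head := "[" ++ PySem.Int.toStr idx ++ "]"
  let body0 := if text == "" then "" else text
  let body1 := PySem.Str.strip (PySem.Str.replace (PySem.Str.replace body0 "\r" " ") "\t" " ")
  let body := if PySem.Str.len body1 > max_chars_per_item
              then PySem.Str.slice body1 none (some max_chars_per_item) ++ "…"
              else body1
  head ++ "\n" ++ body

-- the running-totals pass of Source B (run starts at 0, appends run+len(b) per block)
def pvAccumB (run : Int) : List String → List Int
  | [] => []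
  | b :: bs => (run + PySem.Str.len b) :: pvAccumB (run + PySem.Str.len b) bs

def build_context_block_from_hits_py_alt (ctx_hits : List String) (topn_ctx : Int) (max_chars_per_item : Int) (max_total_chars : Int) : String :=
  let blocks := (PySem.List.enumerate (PySem.List.slice ctx_hits none (some topn_ctx)) 1).map
                  (fun p => pvFmtB max_chars_per_item p.1 p.2)
  let totals := pvAccumB 0 blocks
  let keep : Int :=
    match (PySem.List.enumerate totals 0).find? (fun p => decide (p.2 > max_total_chars)) with
    | some p => p.1
    | none => PySem.List.len blocks
  PySem.Str.join "\n\n" (PySem.List.slice blocks none (some keep))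

-- ===== PRECONDITION & SPEC =====
def Spec_build_context_block_from_hits_py (ctx_hits : List String) (topn_ctx : Int) (max_chars_per_item : Int) (max_total_chars : Int) (out : String) : Prop := out = build_context_block_from_hits_py_alt ctx_hits topn_ctx max_chars_per_item max_total_chars
instance (ctx_hits : List String) (topn_ctx : Int) (max_chars_per_item : Int) (max_total_chars : Int) (out : String) : Decidable (Spec_build_context_block_from_hits_py ctx_hits topn_ctx max_chars_per_item max_total_chars out) := by unfold Spec_build_context_block_from_hits_py; infer_instance

-- ===== CLAIM (what is proved, stated in full; the proofs are below) =====
def Claim_equal_build_context_block_from_hits_py : Prop := ∀ (ctx_hits : List String) (topn_ctx : Int) (max_chars_per_item : Int) (max_total_chars : Int), Dom_build_context_block_from_hits_py ctx_hits topn_ctx max_chars_per_item max_total_chars → Spec_build_context_block_from_hits_py ctx_hits topn_ctx max_chars_per_item max_total_chars (build_context_block_from_hits_py ctx_hits topn_ctx max_chars_per_item max_total_chars)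

-- ===== LEMMAS AND PROOFS =====

-- number of blocks B keeps, as a Nat, for totals starting from run = t
def pvKeepNat (max_total_chars t : Int) (bs : List String) : Nat :=
  match (PySem.List.enumerate (pvAccumB t bs) 0).find? (fun p => decide (p.2 > max_total_chars)) with
  | some p => p.1.toNat
  | none => bs.length

theorem pvFind_enumerate_shift (mtc : Int) (ts : List Int) (s : Int) :
    (PySem.List.enumerate ts s).find? (fun p => decide (p.2 > mtc)) =
      ((PySem.List.enumerate ts 0).find? (fun p => decide (p.2 > mtc))).map
        (fun q => (s + q.1, q.2)) := by
  induction ts generalizing s with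
  | nil => simp [PySem.List.enumerate_nil]
  | cons t ts ih =>
    by_cases h : t > mtc
    · simp [PySem.List.enumerate_cons, h]
    · simp only [PySem.List.enumerate_cons, List.find?, h, decide_false]
      rw [ih (s + 1), ih (0 + 1), Option.map_map]
      congr 1
      funext q
      simp
      omega

theorem pvMatch_shift (X : Option (Int × Int)) (n : Nat) :
    (∀ p, X = some p → 0 ≤ p.1) →
    (match Option.map (fun q => ((1 : Int) + q.1, q.2)) X with
     | some p => p.1.toNat | none => n + 1)
    = (match X with | some p => p.1.toNat | none => n) + 1 := by
  cases X with
  | none => intro _; rfl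
  | some q =>
    intro h0
    have hq := h0 q rfl
    show ((1 : Int) + q.1).toNat = q.1.toNat + 1
    omega

theorem pvSlice_match (bs : List String) (X : Option (Int × Int)) :
    (∀ p, X = some p → 0 ≤ p.1) →
    PySem.List.slice bs none
      (some (match X with | some p => p.1 | none => PySem.List.len bs))
    = List.take (match X with | some p => p.1.toNat | none => bs.length) bs := by
  cases X with
  | none =>
    intro _
    show PySem.List.slice bs none (some (PySem.List.len bs)) = List.take bs.length bs
    have h : PySem.List.len bs = ((bs.length : Nat) : Int) := by simp
    rw [h, PySem.List.slice_to_natCast]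
  | some q =>
    intro h0
    have hq := h0 q rfl
    show PySem.List.slice bs none (some q.1) = List.take q.1.toNat bs
    rw [PySem.List.slice_to bs hq]

theorem pvFind_nonneg (ts : List Int) (mtc : Int) :
    ∀ p, (PySem.List.enumerate ts 0).find? (fun q => decide (q.2 > mtc)) = some p → 0 ≤ p.1 := by
  intro p hp
  have hmem := List.mem_of_find?_eq_some hp
  rw [PySem.List.mem_enumerate_iff] at hmem
  obtain ⟨k, hk, hq⟩ := hmem
  subst hq
  simp

theorem pvKeepNat_cons_pos (mtc t : Int) (b : String) (bs : List String)
    (h : t + PySem.Str.len b > mtc) : pvKeepNat mtc t (b :: bs) = 0 := by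
  unfold pvKeepNat
  simp only [pvAccumB, PySem.List.enumerate_cons, List.find?, decide_eq_true h]
  rfl

theorem pvKeepNat_cons_neg (mtc t : Int) (b : String) (bs : List String)
    (h : ¬ t + PySem.Str.len b > mtc) :
    pvKeepNat mtc t (b :: bs) = pvKeepNat mtc (t + PySem.Str.len b) bs + 1 := by
  unfold pvKeepNat
  simp only [pvAccumB, PySem.List.enumerate_cons, List.find?, decide_eq_false h]
  rw [pvFind_enumerate_shift mtc (pvAccumB (t + PySem.Str.len b) bs) (0 + 1)]
  exact pvMatch_shift _ _ (pvFind_nonneg _ _)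

theorem pvGoA_eq_take (mcpi mtc : Int) (ps : List (Int × String)) (acc : List String) (t : Int) :
    pvGoA mcpi mtc ps acc t =
      acc ++ List.take (pvKeepNat mtc t (ps.map (fun p => pvFmtB mcpi p.1 p.2)))
        (ps.map (fun p => pvFmtB mcpi p.1 p.2)) := by
  induction ps generalizing acc t with
  | nil => simp [pvGoA]
  | cons p ps ih =>
    obtain ⟨idx, text⟩ := p
    show (if t + PySem.Str.len (pvFmtB mcpi idx text) > mtc then acc
          else pvGoA mcpi mtc ps (acc ++ [pvFmtB mcpi idx text])
                 (t + PySem.Str.len (pvFmtB mcpi idx text))) = _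
    have hmap : ((idx, text) :: ps).map (fun p => pvFmtB mcpi p.1 p.2)
        = pvFmtB mcpi idx text :: ps.map (fun p => pvFmtB mcpi p.1 p.2) := rfl
    rw [hmap]
    by_cases h : t + PySem.Str.len (pvFmtB mcpi idx text) > mtc
    · rw [if_pos h, pvKeepNat_cons_pos mtc t _ _ h, List.take_zero, List.append_nil]
    · rw [if_neg h, ih, pvKeepNat_cons_neg mtc t _ _ h, List.take_succ_cons]
      simp

theorem pvKeep_slice (mtc : Int) (bs : List String) :
    PySem.List.slice bs none
      (some (match (PySem.List.enumerate (pvAccumB 0 bs) 0).find? (fun p => decide (p.2 > mtc)) with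
             | some p => p.1
             | none => PySem.List.len bs)) =
    List.take (pvKeepNat mtc 0 bs) bs := by
  unfold pvKeepNat
  exact pvSlice_match bs _ (pvFind_nonneg _ _)

-- ===== VERDICT (by name: the statement is the Claim_ definition above) =====
theorem build_context_block_from_hits_py_spec : Claim_equal_build_context_block_from_hits_py := by
  intro ctx_hits topn_ctx mcpi mtc _
  show build_context_block_from_hits_py ctx_hits topn_ctx mcpi mtc
      = build_context_block_from_hits_py_alt ctx_hits topn_ctx mcpi mtc
  unfold build_context_block_from_hits_py build_context_block_from_hits_py_alt
  rw [pvGoA_eq_take]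
  simp only [List.nil_append]
  rw [← pvKeep_slice mtc ((PySem.List.enumerate (PySem.List.slice ctx_hits none (some topn_ctx)) 1).map
      (fun p => pvFmtB mcpi p.1 p.2))]
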